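-- pv_equiv track=rewrite | github.com/JasonAnthonyNugroho/Project_Metric | controller.py | count_mamcl
-- ===== SOURCE A (Python) =====
-- def count_mamcl(code):
--     max_chain = 0
--     lines = code.splitlines()
--     for line in lines:
--         line = line.strip()
--         if not line or line.startswith(("//", "/*", "*", "*/")):
--             continue
--
--         # Cari semua chain method calls dalam satu baris
--         current_chain = 0
--         parts = line.split(".")
--         if len(parts) > 1:
--             # Mulai dari index 1 karena index 0 adalah objek
--             for part in parts[1:]:
--                 # Check if it's a method call (contains parentheses)
--                 if "(" in part and ")" in part:
--                     current_chain += 1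
--                 else:
--                     # Reset if not a method call, as the chain is broken
--                     current_chain = 0
--                     break # Stop processing this line as chain is broken
--         max_chain = max(max_chain, current_chain)
--     return max_chain
-- ===== SOURCE B (Python) =====
-- def count_mamcl(code):
--     best = 0
--     for raw in code.splitlines():
--         line = raw.strip()
--         if not line or line.startswith(("//", "/*", "*", "*/")):
--             continue
--         # single left-to-right character scan: count dots; each segment after a
--         # dot must show both '(' and ')' before the next dot / end of line
--         dots = 0
--         ok = True
--         has_open = False
--         has_close = False
--         for ch in line:
--             if ch == ".":
--                 if dots > 0 and not (has_open and has_close):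
--                     ok = False
--                     break
--                 dots += 1
--                 has_open = False
--                 has_close = False
--             elif ch == "(":
--                 has_open = True
--             elif ch == ")":
--                 has_close = True
--         if ok and dots > 0 and has_open and has_close:
--             best = max(best, dots)
--     return best
-- ===== Notes on version B (the rewrite author's own statement) =====
-- stated objective: alternative
-- what changed: Replaces A's split-into-parts-then-count loop by a single left-to-right character scan per line: a small state machine counts dots and tracks whether the current dot-delimited segment has shown both parentheses, so no parts list is ever built.
import Mathlib
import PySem

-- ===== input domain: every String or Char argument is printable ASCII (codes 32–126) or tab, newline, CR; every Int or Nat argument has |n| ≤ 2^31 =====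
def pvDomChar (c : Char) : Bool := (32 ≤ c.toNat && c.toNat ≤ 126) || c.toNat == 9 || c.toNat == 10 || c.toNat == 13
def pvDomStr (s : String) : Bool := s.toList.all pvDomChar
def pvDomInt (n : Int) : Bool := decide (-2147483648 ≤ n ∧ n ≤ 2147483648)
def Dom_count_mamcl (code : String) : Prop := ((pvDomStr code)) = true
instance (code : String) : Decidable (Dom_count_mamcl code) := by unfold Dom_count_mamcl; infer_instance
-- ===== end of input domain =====

-- B replaces A's split-into-parts counting loop by a single per-line character scan (a small
-- dot/parenthesis state machine, no parts list); objective: alternative, same cost.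

-- ===== PORT A =====
-- A's inner loop: walk parts[1:], +1 per method-call part, break with result 0 at the first non-call part.
def pvAInner : List (List Char) → Int → Int
  | [], cur => cur
  | p :: rest, cur =>
    if PySem.Chars.isIn ['('] p && PySem.Chars.isIn [')'] p then pvAInner rest (cur + 1)
    else 0

def count_mamcl (code : String) : Int :=
  (PySem.Str.splitlines code).foldl (fun max_chain rawLine =>
    let line := PySem.Str.strip rawLine
    if line == "" || PySem.Str.startswith line "//" || PySem.Str.startswith line "/*" ||
       PySem.Str.startswith line "*" || PySem.Str.startswith line "*/" then
      max_chain
    else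
      let parts := PySem.Chars.splitOn line.toList ['.']
      let current_chain := if parts.length > 1 then pvAInner (parts.drop 1) 0 else 0
      max max_chain current_chain) 0

-- ===== PORT B =====
-- Source B's inner character loop; Python's `break` (ok = False) makes the line's value 0,
-- so the recursion returns 0 directly at that point.
def pvScan : List Char → Nat → Bool → Bool → Int
  | [], dots, hO, hC => if dots > 0 && hO && hC then (dots : Int) else 0
  | ch :: rest, dots, hO, hC =>
    if ch = '.' then
      if dots > 0 && !(hO && hC) then 0
      else pvScan rest (dots + 1) false false
    else if ch = '(' then pvScan rest dots true hC
    else if ch = ')' then pvScan rest dots hO true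
    else pvScan rest dots hO hC

def pvSkipB (line : String) : Bool :=
  line == "" || PySem.Str.startswith line "//" || PySem.Str.startswith line "/*" ||
  PySem.Str.startswith line "*" || PySem.Str.startswith line "*/"

def count_mamcl_alt (code : String) : Int :=
  (PySem.Str.splitlines code).foldl (fun best raw =>
    let line := PySem.Str.strip raw
    if pvSkipB line then best
    else max best (pvScan line.toList 0 false false)) 0

-- ===== PRECONDITION & SPEC =====
def Spec_count_mamcl (code : String) (out : Int) : Prop := out = count_mamcl_alt code
instance (code : String) (out : Int) : Decidable (Spec_count_mamcl code out) := by unfold Spec_count_mamcl; infer_instance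

-- ===== CLAIM =====
def Claim_equal_count_mamcl : Prop := ∀ (code : String), Dom_count_mamcl code → Spec_count_mamcl code (count_mamcl code)

-- ===== LEMMAS AND PROOFS =====

-- reference splitter: split on '.' (proved equal to PySem.Chars.splitOn · ['.'])
def pvSp : List Char → List (List Char)
  | [] => [[]]
  | c :: cs => if c = '.' then [] :: pvSp cs else (pvSp cs).modifyHead (c :: ·)

theorem pvSp_ne_nil (cs : List Char) : pvSp cs ≠ [] := by
  cases cs with
  | nil => simp [pvSp]
  | cons c cs =>
    simp only [pvSp]
    split
    · simp
    · cases h : pvSp cs with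
      | nil => exact absurd h (pvSp_ne_nil cs)
      | cons a t => simp [List.modifyHead]

theorem splitOn_go_eq (fuel : Nat) (l cur : List Char) (acc : List (List Char))
    (h : l.length < fuel) :
    PySem.Chars.splitOn.go ['.'] fuel l cur acc
      = acc.reverse ++ (pvSp l).modifyHead (cur.reverse ++ ·) := by
  induction fuel generalizing l cur acc with
  | zero => omega
  | succ fuel ih =>
    cases l with
    | nil =>
      simp [PySem.Chars.splitOn.go, pvSp, List.modifyHead]
    | cons c rest =>
      rw [PySem.Chars.splitOn.go]
      by_cases hc : c = '.'
      · subst hc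
        have hpre : List.isPrefixOf ['.'] ('.' :: rest) = true := by
          simp [List.isPrefixOf]
        rw [if_pos hpre]
        have hdl : List.drop (['.'] : List Char).length ('.' :: rest) = rest := rfl
        rw [hdl]
        simp only [List.length_cons] at h
        rw [ih _ _ _ (by omega)]
        cases hsp : pvSp rest <;> simp [pvSp, List.modifyHead, hsp]
      · have hpre2 : ¬ (List.isPrefixOf ['.'] (c :: rest) = true) := by
          simp only [List.isPrefixOf, Bool.and_true, beq_iff_eq]
          exact fun h => hc h.symm
        rw [if_neg hpre2]
        simp only [List.length_cons] at h
        rw [ih _ _ _ (by omega)]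
        simp only [pvSp, if_neg hc]
        rw [List.modifyHead_modifyHead]
        have hfe : (fun x => (c :: cur).reverse ++ x)
            = ((fun x => cur.reverse ++ x) ∘ fun x => c :: x) := by
          funext x; simp [Function.comp]
        rw [hfe]

theorem splitOn_eq_pvSp (cs : List Char) :
    PySem.Chars.splitOn cs ['.'] = pvSp cs := by
  unfold PySem.Chars.splitOn
  rw [splitOn_go_eq _ _ _ _ (by omega)]
  simp only [List.reverse_nil, List.nil_append]
  cases h : pvSp cs with
  | nil => exact absurd h (pvSp_ne_nil cs)
  | cons a t => simp [List.modifyHead]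

-- single-character `sub in s` is list membership
theorem isIn_singleton (a : Char) (l : List Char) :
    PySem.Chars.isIn [a] l = l.contains a := by
  by_cases h : a ∈ l
  · obtain ⟨s, t, rfl⟩ := List.append_of_mem h
    have : [a] <:+: s ++ a :: t := ⟨s, t, by simp⟩
    rw [(PySem.Chars.isIn_iff_infix _ _).2 this]
    simp [h]
  · have : ¬ ([a] <:+: l) := fun hin => h (hin.mem (by simp))
    rw [(PySem.Chars.isIn_eq_false_iff _ _).2 this]
    simp [h]

def pvGood (p : List Char) : Bool := PySem.Chars.isIn ['('] p && PySem.Chars.isIn [')'] p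

-- A's inner loop in closed form
theorem pvAInner_eq (ps : List (List Char)) (c : Int) :
    pvAInner ps c = if ps.all pvGood = true then c + ps.length else 0 := by
  induction ps generalizing c with
  | nil => simp [pvAInner]
  | cons p rest ih =>
    by_cases h : pvGood p = true
    · rw [pvAInner, if_pos (by simpa [pvGood] using h), ih]
      simp only [List.all_cons, h, Bool.true_and, List.length_cons]
      split
      · push_cast; ring
      · rfl
    · rw [Bool.not_eq_true] at h
      rw [pvAInner]
      simp only [pvGood] at h
      simp [List.all_cons, h, pvGood]

-- the scan in the middle of a line (at least one dot already seen)
theorem pvScan_mid (cs : List Char) (dots : Nat) (hO hC : Bool) (hd : 0 < dots) :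
    pvScan cs dots hO hC =
      if ((hO || (pvSp cs).head!.contains '(') && (hC || (pvSp cs).head!.contains ')')
          && ((pvSp cs).tail.all pvGood)) = true
      then (dots : Int) + (pvSp cs).length - 1 else 0 := by
  induction cs generalizing dots hO hC with
  | nil =>
    simp only [pvScan, pvSp, List.head!, List.tail, List.all_nil, List.contains_nil,
      Bool.or_false, Bool.and_true, List.length_cons, List.length_nil]
    simp only [gt_iff_lt, hd, decide_true, Bool.true_and]
    split <;> simp
  | cons c rest ih =>
    by_cases hc : c = '.'
    · subst hc
      rw [pvScan, if_pos rfl]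
      have hsphead : pvSp ('.' :: rest) = [] :: pvSp rest := by simp [pvSp]
      by_cases hok : (hO && hC) = true
      · rw [if_neg (by simp [hok])]
        rw [ih (dots + 1) false false (by omega)]
        cases hO
        · simp at hok
        cases hC
        · simp at hok
        cases hrest : pvSp rest with
        | nil => exact absurd hrest (pvSp_ne_nil rest)
        | cons a t =>
          have hg : pvGood a = (a.contains '(' && a.contains ')') := by
            simp [pvGood, isIn_singleton]
          simp only [hsphead, hrest, List.head!, List.tail, List.all_cons, List.length_cons,
            List.contains_nil, Bool.or_false, Bool.false_or, Bool.true_and, hg]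
          by_cases hcond : (a.contains '(' && a.contains ')' && t.all pvGood) = true
          · rw [if_pos (by simp_all [Bool.and_assoc]), if_pos (by simp_all [Bool.and_assoc])]
            push_cast; ring
          · rw [if_neg (by simp_all [Bool.and_assoc]), if_neg (by simp_all [Bool.and_assoc])]
      · have h1 : (decide (dots > 0) && !(hO && hC)) = true := by simp [hok, hd]
        rw [if_pos h1]
        cases hO <;> cases hC <;> simp_all
    · have hsp : pvSp (c :: rest) = (pvSp rest).modifyHead (c :: ·) := by
        simp [pvSp, hc]
      cases hrest : pvSp rest with
      | nil => exact absurd hrest (pvSp_ne_nil rest)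
      | cons a t =>
        have hhead : (pvSp (c :: rest)).head! = c :: a := by
          simp [hsp, hrest, List.modifyHead]
        have htail : (pvSp (c :: rest)).tail = t := by
          simp [hsp, hrest, List.modifyHead]
        have hlen : (pvSp (c :: rest)).length = t.length + 1 := by
          simp [hsp, hrest, List.modifyHead]
        by_cases ho : c = '('
        · subst ho
          rw [pvScan, if_neg (by decide), if_pos rfl, ih dots true hC hd, hrest, hhead, htail,
            hlen]
          simp [List.head!, List.tail]
        · by_cases hcl : c = ')'
          · subst hcl
            rw [pvScan, if_neg (by decide), if_neg (by decide), if_pos rfl,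
              ih dots hO true hd, hrest, hhead, htail, hlen]
            simp [List.head!, List.tail]
          · rw [pvScan, if_neg hc, if_neg ho,
              if_neg hcl, ih dots hO hC hd, hrest, hhead, htail, hlen]
            have ho' : ¬ '(' = c := fun h => ho h.symm
            have hcl' : ¬ ')' = c := fun h => hcl h.symm
            simp [List.head!, List.tail, ho', hcl']

-- at dots = 0 the flags are irrelevant
theorem pvScan_zero_flags (cs : List Char) (hO hC : Bool) :
    pvScan cs 0 hO hC = pvScan cs 0 false false := by
  induction cs generalizing hO hC with
  | nil => simp [pvScan]
  | cons c rest ih =>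
    by_cases hc : c = '.'
    · subst hc; simp [pvScan]
    · by_cases ho : c = '('
      · subst ho
        rw [pvScan, if_neg (by decide), if_pos rfl,
            pvScan, if_neg (by decide), if_pos rfl]
        exact (ih true hC).trans (ih true false).symm
      · by_cases hcl : c = ')'
        · subst hcl
          rw [pvScan, if_neg (by decide), if_neg (by decide), if_pos rfl,
              pvScan, if_neg (by decide), if_neg (by decide), if_pos rfl]
          exact (ih hO true).trans (ih false true).symm
        · rw [pvScan, if_neg hc, if_neg ho,
              if_neg hcl,
              pvScan, if_neg hc, if_neg ho,
              if_neg hcl]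
          exact ih hO hC

-- both per-line computations agree
theorem perLine_eq (cs : List Char) :
    (let parts := PySem.Chars.splitOn cs ['.']
     if parts.length > 1 then pvAInner (parts.drop 1) 0 else 0)
      = pvScan cs 0 false false := by
  rw [splitOn_eq_pvSp]
  induction cs with
  | nil => simp [pvSp, pvScan]
  | cons c rest ih =>
    by_cases hc : c = '.'
    · subst hc
      have hR : pvScan ('.' :: rest) 0 false false = pvScan rest 1 false false := by
        rw [pvScan, if_pos rfl, if_neg (by simp)]
      rw [hR, pvScan_mid rest 1 false false (by omega)]
      have hsphead : pvSp ('.' :: rest) = [] :: pvSp rest := by simp [pvSp]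
      cases hrest : pvSp rest with
      | nil => exact absurd hrest (pvSp_ne_nil rest)
      | cons a t =>
        rw [hsphead, hrest]
        simp only [List.length_cons, List.drop_succ_cons, List.drop_zero, gt_iff_lt]
        rw [if_pos (by omega), pvAInner_eq]
        have hg : pvGood a = (a.contains '(' && a.contains ')') := by
          simp [pvGood, isIn_singleton]
        simp only [List.head!, List.tail, List.all_cons, Bool.false_or, hg]
        by_cases hcond : (a.contains '(' && a.contains ')' && t.all pvGood) = true
        · rw [if_pos (by simp_all [Bool.and_assoc]), if_pos (by simp_all [Bool.and_assoc])]
          push_cast [List.length_cons]; ring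
        · rw [if_neg (by simp_all [Bool.and_assoc]), if_neg (by simp_all [Bool.and_assoc])]
    · have hsp : pvSp (c :: rest) = (pvSp rest).modifyHead (c :: ·) := by
        simp [pvSp, hc]
      cases hrest : pvSp rest with
      | nil => exact absurd hrest (pvSp_ne_nil rest)
      | cons a t =>
        have hL : (let parts := pvSp (c :: rest);
              if parts.length > 1 then pvAInner (List.drop 1 parts) 0 else 0)
            = (let parts := pvSp rest;
              if parts.length > 1 then pvAInner (List.drop 1 parts) 0 else 0) := by
          simp [hsp, hrest, List.modifyHead]
        rw [hL, ih]
        by_cases ho : c = '('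
        · subst ho
          rw [pvScan, if_neg (by decide), if_pos rfl]
          exact (pvScan_zero_flags rest true false).symm
        · by_cases hcl : c = ')'
          · subst hcl
            rw [pvScan, if_neg (by decide), if_neg (by decide), if_pos rfl]
            exact (pvScan_zero_flags rest false true).symm
          · rw [pvScan, if_neg hc, if_neg ho,
              if_neg hcl]

-- foldl congruence used by the verdict
theorem pv_foldl_congr {α β : Type} {f g : β → α → β} (h : ∀ b a, f b a = g b a) :
    ∀ (l : List α) (b : β), l.foldl f b = l.foldl g b := by
  intro l
  induction l with
  | nil => intro b; rfl
  | cons x t ih => intro b; rw [List.foldl_cons, List.foldl_cons, h]; exact ih _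

-- ===== VERDICT =====
theorem count_mamcl_spec : Claim_equal_count_mamcl := by
  intro code _
  unfold Spec_count_mamcl count_mamcl count_mamcl_alt
  apply pv_foldl_congr
  intro b raw
  simp only [pvSkipB]
  split
  · rfl
  · rw [← perLine_eq (PySem.Str.strip raw).toList]
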